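-- pv_equiv track=rewrite | github.com/anmol12342/Python | main.py | build_support_handoff_stats
-- ===== SOURCE A (Python) =====
-- def build_support_handoff_stats(handoffs):
--     stats = {
--         "total": len(handoffs),
--         "waiting_for_representative": 0,
--         "in_progress": 0,
--         "resolved": 0,
--         "closed": 0,
--         "high_priority": 0,
--         "unassigned": 0,
--     }
--     for ticket in handoffs:
--         status = ticket.get("status") or "waiting_for_representative"
--         if status in stats:
--             stats[status] += 1
--         if ticket.get("priority") in {"High", "Urgent"}:
--             stats["high_priority"] += 1
--         if not ticket.get("assigned_to"):
--             stats["unassigned"] += 1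
--     return stats
-- ===== SOURCE B (Python) =====
-- STATUS_KEYS = ("waiting_for_representative", "in_progress", "resolved", "closed")
--
--
-- def build_support_handoff_stats(handoffs):
--     # Histogram of normalized statuses, built once.
--     status_counts = {}
--     for ticket in handoffs:
--         status = ticket.get("status") or "waiting_for_representative"
--         status_counts[status] = status_counts.get(status, 0) + 1
--     stats = {"total": len(handoffs)}
--     for key in STATUS_KEYS:
--         stats[key] = status_counts.get(key, 0)
--     stats["high_priority"] = sum(
--         1 for t in handoffs if t.get("priority") in {"High", "Urgent"})
--     stats["unassigned"] = sum(1 for t in handoffs if not t.get("assigned_to"))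
--     return stats
-- ===== Notes on version B (the rewrite author's own statement) =====
-- stated objective: idiomatic
-- what changed: A's single fused loop mutating a 7-key stats dict is replaced by a status histogram built once, from which the four status fields are pulled, while total comes from len() and high_priority/unassigned are separate generator sums.
-- intended difference: On inputs containing a ticket whose (defaulted) status string is literally 'total', 'high_priority' or 'unassigned', A also increments those aggregate fields (its status counter and its aggregates share one dict), whereas B keeps total = len(handoffs) and high_priority/unassigned as pure priority/assignment tallies, which is the intended meaning of those fields. — e.g. on build_support_handoff_stats([[("status", "total")]]): A returns [("total", 2), ("waiting_for_representative", 0), ("in_progress", 0), ("resolved", 0), ("closed", 0), ("high_priority",…, B returns [("total", 1), ("waiting_for_representative", 0), ("in_progress", 0), ("resolved", 0), ("closed", 0), ("high_priority",…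
import Mathlib
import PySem

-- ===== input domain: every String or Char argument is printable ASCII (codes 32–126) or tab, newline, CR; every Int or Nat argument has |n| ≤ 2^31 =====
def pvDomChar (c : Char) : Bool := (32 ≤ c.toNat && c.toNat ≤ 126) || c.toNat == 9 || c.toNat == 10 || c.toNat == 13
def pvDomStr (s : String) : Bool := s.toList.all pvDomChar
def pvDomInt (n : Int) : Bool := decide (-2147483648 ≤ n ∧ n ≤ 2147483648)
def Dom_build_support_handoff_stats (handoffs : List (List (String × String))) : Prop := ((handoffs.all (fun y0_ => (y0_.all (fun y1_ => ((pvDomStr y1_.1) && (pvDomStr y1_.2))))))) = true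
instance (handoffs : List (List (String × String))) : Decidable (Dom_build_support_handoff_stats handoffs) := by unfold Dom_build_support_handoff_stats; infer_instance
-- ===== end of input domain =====

-- B replaces A's fused counting loop by a status histogram built once plus a derived result table (idiomatic; same cost).

-- ticket.get(k): association-list lookup, first match (type convention for dict arguments)
def pvTicketGet (t : List (String × String)) (k : String) : Option String :=
  (t.find? (fun p => p.1 == k)).map (·.2)

-- ===== PORT A =====
def build_support_handoff_stats (handoffs : List (List (String × String))) : List (String × Int) :=
  let stats : PySem.Dict String Int :=
    ((((((PySem.Dict.empty.insert "total" (handoffs.length : Int)).insert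
        "waiting_for_representative" 0).insert "in_progress" 0).insert "resolved" 0).insert
        "closed" 0).insert "high_priority" 0).insert "unassigned" 0
  (handoffs.foldl (fun stats ticket =>
    -- status = ticket.get("status") or "waiting_for_representative"  ('or': None and "" are falsy)
    let status : String :=
      match pvTicketGet ticket "status" with
      | none => "waiting_for_representative"
      | some s => if s = "" then "waiting_for_representative" else s
    let stats := if stats.contains status then stats.modify status 0 (· + 1) else stats
    let stats :=
      if pvTicketGet ticket "priority" = some "High" ∨ pvTicketGet ticket "priority" = some "Urgent"
      then stats.modify "high_priority" 0 (· + 1) else stats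
    let stats :=
      if pvTicketGet ticket "assigned_to" = none ∨ pvTicketGet ticket "assigned_to" = some ""
      then stats.modify "unassigned" 0 (· + 1) else stats
    stats) stats).items

-- ===== PORT B =====
def pvStatusKeys : List String :=
  ["waiting_for_representative", "in_progress", "resolved", "closed"]

def build_support_handoff_stats_alt (handoffs : List (List (String × String))) : List (String × Int) :=
  let status_counts : PySem.Dict String Int :=
    handoffs.foldl (fun d ticket =>
      let status : String :=
        match pvTicketGet ticket "status" with
        | none => "waiting_for_representative"
        | some v => if v = "" then "waiting_for_representative" else v
      d.insert status (d.getD status 0 + 1)) PySem.Dict.empty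
  let stats : PySem.Dict String Int := PySem.Dict.empty.insert "total" (handoffs.length : Int)
  let stats := pvStatusKeys.foldl (fun st key => st.insert key (status_counts.getD key 0)) stats
  let stats := stats.insert "high_priority"
    (handoffs.countP (fun t =>
      pvTicketGet t "priority" = some "High" ∨ pvTicketGet t "priority" = some "Urgent") : Int)
  let stats := stats.insert "unassigned"
    (handoffs.countP (fun t =>
      pvTicketGet t "assigned_to" = none ∨ pvTicketGet t "assigned_to" = some "") : Int)
  stats.items

-- ===== PRECONDITION & SPEC =====
-- On inputs containing a ticket whose (defaulted) status string is literally "total",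
-- "high_priority" or "unassigned", A also increments those aggregate fields (its status
-- counter and its aggregates share one dict); B keeps total = len(handoffs) and
-- high_priority/unassigned as pure priority/assignment tallies, the intended meaning.
def D_build_support_handoff_stats (handoffs : List (List (String × String))) : Prop :=
  ∃ t ∈ handoffs,
    t.lookup "status" ∈ ([some "total", some "high_priority", some "unassigned"] : List (Option String))
instance (handoffs : List (List (String × String))) : Decidable (D_build_support_handoff_stats handoffs) := by unfold D_build_support_handoff_stats; infer_instance

def Spec_build_support_handoff_stats (handoffs : List (List (String × String))) (out : List (String × Int)) : Prop := ¬ D_build_support_handoff_stats handoffs → out = build_support_handoff_stats_alt handoffs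
instance (handoffs : List (List (String × String))) (out : List (String × Int)) : Decidable (Spec_build_support_handoff_stats handoffs out) := by unfold Spec_build_support_handoff_stats; infer_instance

def pvDiffWitness_build_support_handoff_stats : (List (List (String × String))) := [[("status", "total")]]
def pvDiffWitnessOut_build_support_handoff_stats : (List (String × Int)) × (List (String × Int)) :=
  ([("total", 2), ("waiting_for_representative", 0), ("in_progress", 0), ("resolved", 0),
    ("closed", 0), ("high_priority", 0), ("unassigned", 1)],
   [("total", 1), ("waiting_for_representative", 0), ("in_progress", 0), ("resolved", 0),
    ("closed", 0), ("high_priority", 0), ("unassigned", 1)])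

-- ===== CLAIM (what is proved, stated in full; the proofs are below) =====
def Claim_unchanged_build_support_handoff_stats : Prop := ∀ (handoffs : List (List (String × String))), Dom_build_support_handoff_stats handoffs → Spec_build_support_handoff_stats handoffs (build_support_handoff_stats handoffs)
def Claim_changed_build_support_handoff_stats : Prop := Dom_build_support_handoff_stats (pvDiffWitness_build_support_handoff_stats) ∧ D_build_support_handoff_stats (pvDiffWitness_build_support_handoff_stats) ∧ build_support_handoff_stats (pvDiffWitness_build_support_handoff_stats) = pvDiffWitnessOut_build_support_handoff_stats.1 ∧ build_support_handoff_stats_alt (pvDiffWitness_build_support_handoff_stats) = pvDiffWitnessOut_build_support_handoff_stats.2 ∧ pvDiffWitnessOut_build_support_handoff_stats.1 ≠ pvDiffWitnessOut_build_support_handoff_stats.2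
def Claim_exact_build_support_handoff_stats : Prop := ∀ (handoffs : List (List (String × String))), Dom_build_support_handoff_stats handoffs → D_build_support_handoff_stats handoffs → build_support_handoff_stats handoffs ≠ build_support_handoff_stats_alt handoffs

-- ===== LEMMAS AND PROOFS =====

lemma pvLookup_eq (t : List (String × String)) : t.lookup "status" = pvTicketGet t "status" := by
  induction t with
  | nil => rfl
  | cons p r ih =>
    cases p with
    | mk a b =>
        by_cases h : a = "status"
        · simp [List.lookup_cons, pvTicketGet, List.find?_cons, h]
        · have h2 : ("status" == a) = false := by simp [Ne.symm h]
          have h3 : (a == "status") = false := by simp [h]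
          simp [List.lookup_cons, pvTicketGet, List.find?_cons, h2, h3] at *
          exact ih

-- the normalized status of a ticket, as both ports compute it
def pvStatus (t : List (String × String)) : String :=
  match pvTicketGet t "status" with
  | none => "waiting_for_representative"
  | some s => if s = "" then "waiting_for_representative" else s

lemma pvD_iff (hs : List (List (String × String))) :
    D_build_support_handoff_stats hs ↔
    ∃ t ∈ hs, pvStatus t ∈ (["total", "high_priority", "unassigned"] : List String) := by
  unfold D_build_support_handoff_stats
  refine exists_congr fun t => and_congr_right fun _ => ?_
  unfold pvStatus
  rw [pvLookup_eq]
  cases h : pvTicketGet t "status" with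
  | none => simp
  | some s => by_cases hs' : s = "" <;> simp [hs']

-- A's stats dict always has exactly these seven keys, in this order
def pvMkD (t w i r c h u : Int) : PySem.Dict String Int :=
  PySem.Dict.mk [("total", t), ("waiting_for_representative", w), ("in_progress", i),
    ("resolved", r), ("closed", c), ("high_priority", h), ("unassigned", u)]

-- A's loop body, named (definitionally equal to the lambda in the port of A)
def pvStepA (stats : PySem.Dict String Int) (ticket : List (String × String)) : PySem.Dict String Int :=
  let status : String := pvStatus ticket
  let stats := if stats.contains status then stats.modify status 0 (· + 1) else stats
  let stats :=
    if pvTicketGet ticket "priority" = some "High" ∨ pvTicketGet ticket "priority" = some "Urgent"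
    then stats.modify "high_priority" 0 (· + 1) else stats
  let stats :=
    if pvTicketGet ticket "assigned_to" = none ∨ pvTicketGet ticket "assigned_to" = some ""
    then stats.modify "unassigned" 0 (· + 1) else stats
  stats

def pvInd (k : String) (tk : List (String × String)) : Int := if pvStatus tk = k then 1 else 0

lemma pvStepA_mkD (tk : List (String × String)) (t w i r c h u : Int) :
    pvStepA (pvMkD t w i r c h u) tk =
    pvMkD (t + pvInd "total" tk) (w + pvInd "waiting_for_representative" tk)
      (i + pvInd "in_progress" tk) (r + pvInd "resolved" tk) (c + pvInd "closed" tk)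
      (h + pvInd "high_priority" tk +
        (if pvTicketGet tk "priority" = some "High" ∨ pvTicketGet tk "priority" = some "Urgent"
         then 1 else 0))
      (u + pvInd "unassigned" tk +
        (if pvTicketGet tk "assigned_to" = none ∨ pvTicketGet tk "assigned_to" = some ""
         then 1 else 0)) := by
  unfold pvStepA pvInd
  by_cases h1 : pvStatus tk = "total" <;>
  by_cases h2 : pvStatus tk = "waiting_for_representative" <;>
  by_cases h3 : pvStatus tk = "in_progress" <;>
  by_cases h4 : pvStatus tk = "resolved" <;>
  by_cases h5 : pvStatus tk = "closed" <;>
  by_cases h6 : pvStatus tk = "high_priority" <;>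
  by_cases h7 : pvStatus tk = "unassigned" <;>
  by_cases hp : pvTicketGet tk "priority" = some "High" ∨ pvTicketGet tk "priority" = some "Urgent" <;>
  by_cases hu : pvTicketGet tk "assigned_to" = none ∨ pvTicketGet tk "assigned_to" = some "" <;>
  simp_all [pvMkD, PySem.Dict.modify, PySem.Dict.insert, PySem.Dict.getD, PySem.Dict.get?,
    PySem.Dict.contains, Ne.symm]

def pvCnt (k : String) (hs : List (List (String × String))) : Int := ((hs.map pvStatus).count k : Int)

lemma pv_foldA (hs : List (List (String × String))) : ∀ t w i r c h u : Int,
    hs.foldl pvStepA (pvMkD t w i r c h u) =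
    pvMkD (t + pvCnt "total" hs) (w + pvCnt "waiting_for_representative" hs)
      (i + pvCnt "in_progress" hs) (r + pvCnt "resolved" hs) (c + pvCnt "closed" hs)
      (h + pvCnt "high_priority" hs +
        (hs.countP (fun tk =>
          pvTicketGet tk "priority" = some "High" ∨ pvTicketGet tk "priority" = some "Urgent") : Int))
      (u + pvCnt "unassigned" hs +
        (hs.countP (fun tk =>
          pvTicketGet tk "assigned_to" = none ∨ pvTicketGet tk "assigned_to" = some "") : Int)) := by
  induction hs with
  | nil => intro t w i r c h u; simp [pvCnt]
  | cons tk rest ih =>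
    intro t w i r c h u
    rw [List.foldl_cons, pvStepA_mkD, ih]
    simp only [pvCnt, pvInd, List.map_cons, List.count_cons, List.countP_cons, beq_iff_eq]
    simp only [pvMkD, PySem.Dict.mk.injEq, List.cons.injEq, Prod.mk.injEq, and_true, true_and]
    refine ⟨?_, ?_, ?_, ?_, ?_, ?_, ?_⟩ <;> push_cast <;> split_ifs <;> first | omega | simp_all

lemma pvA_eq (hs : List (List (String × String))) :
    build_support_handoff_stats hs = (hs.foldl pvStepA (pvMkD (hs.length : Int) 0 0 0 0 0 0)).items := rfl

-- B's histogram, named (definitionally equal to the fold in the port of B)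
def pvBCounts (handoffs : List (List (String × String))) : PySem.Dict String Int :=
  handoffs.foldl (fun d t =>
      let s : String :=
        match pvTicketGet t "status" with
        | none => "waiting_for_representative"
        | some v => if v = "" then "waiting_for_representative" else v
      d.insert s (d.getD s 0 + 1)) PySem.Dict.empty

lemma pvB_count (hs : List (List (String × String))) (k : String) :
    (pvBCounts hs).getD k 0 = pvCnt k hs := by
  have h : pvBCounts hs
      = ((hs.map pvStatus).foldl (fun d s => d.insert s (d.getD s 0 + 1)) PySem.Dict.empty) :=
    (List.foldl_map (f := pvStatus)
      (g := fun (d : PySem.Dict String Int) (s : String) => d.insert s (d.getD s 0 + 1))).symm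
  rw [h, PySem.Dict.getD_foldl_insert_add_one]
  simp [pvCnt, PySem.Dict.getD_empty]

lemma pvB_eq (hs : List (List (String × String))) :
    build_support_handoff_stats_alt hs =
    [("total", (hs.length : Int)),
     ("waiting_for_representative", pvCnt "waiting_for_representative" hs),
     ("in_progress", pvCnt "in_progress" hs),
     ("resolved", pvCnt "resolved" hs),
     ("closed", pvCnt "closed" hs),
     ("high_priority",
        (hs.countP (fun tk =>
          pvTicketGet tk "priority" = some "High" ∨ pvTicketGet tk "priority" = some "Urgent") : Int)),
     ("unassigned",
        (hs.countP (fun tk =>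
          pvTicketGet tk "assigned_to" = none ∨ pvTicketGet tk "assigned_to" = some "") : Int))] := by
  show (((pvStatusKeys.foldl (fun st key => st.insert key ((pvBCounts hs).getD key 0))
      (PySem.Dict.empty.insert "total" (hs.length : Int))).insert "high_priority" _).insert
      "unassigned" _).items = _
  simp [pvStatusKeys, List.foldl_cons, PySem.Dict.insert, PySem.Dict.empty, PySem.Dict.items,
    PySem.Dict.getD, PySem.Dict.get?]
  exact ⟨pvB_count hs _, pvB_count hs _, pvB_count hs _, pvB_count hs _⟩

lemma pvCnt_zero_of_notD (hs : List (List (String × String)))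
    (h : ¬ D_build_support_handoff_stats hs)
    (k : String) (hk : k ∈ (["total", "high_priority", "unassigned"] : List String)) :
    pvCnt k hs = 0 := by
  rw [pvD_iff] at h
  push_neg at h
  unfold pvCnt
  have : k ∉ hs.map pvStatus := by
    intro hmem
    obtain ⟨t, ht, hst⟩ := List.mem_map.mp hmem
    exact h t ht (hst ▸ hk)
  simp [List.count_eq_zero.mpr this]

lemma pv_unchanged (hs : List (List (String × String)))
    (h : ¬ D_build_support_handoff_stats hs) :
    build_support_handoff_stats hs = build_support_handoff_stats_alt hs := by
  rw [pvA_eq, pv_foldA, pvB_eq]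
  have ht := pvCnt_zero_of_notD hs h "total" (by simp)
  have hh := pvCnt_zero_of_notD hs h "high_priority" (by simp)
  have hu := pvCnt_zero_of_notD hs h "unassigned" (by simp)
  simp [pvMkD, PySem.Dict.items, ht, hh, hu]

lemma pv_exact (hs : List (List (String × String)))
    (hd : D_build_support_handoff_stats hs) :
    build_support_handoff_stats hs ≠ build_support_handoff_stats_alt hs := by
  rw [pvA_eq, pv_foldA, pvB_eq]
  obtain ⟨t, ht, hst⟩ := (pvD_iff hs).mp hd
  have hpos : 0 < pvCnt "total" hs ∨ 0 < pvCnt "high_priority" hs ∨ 0 < pvCnt "unassigned" hs := by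
    simp only [List.mem_cons, List.mem_singleton, List.not_mem_nil, or_false] at hst
    have hmem : pvStatus t ∈ hs.map pvStatus := List.mem_map.mpr ⟨t, ht, rfl⟩
    rcases hst with h | h | h
    · left; unfold pvCnt; rw [← h]; exact_mod_cast List.count_pos_iff.mpr hmem
    · right; left; unfold pvCnt; rw [← h]; exact_mod_cast List.count_pos_iff.mpr hmem
    · right; right; unfold pvCnt; rw [← h]; exact_mod_cast List.count_pos_iff.mpr hmem
  intro heq
  simp only [pvMkD, PySem.Dict.items, PySem.Dict.mk.injEq, List.cons.injEq, Prod.mk.injEq] at heq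
  obtain ⟨⟨_, e1⟩, _, _, _, _, ⟨_, e6⟩, ⟨_, e7⟩, _⟩ := heq
  omega

-- ===== VERDICT (by name: the statement is the Claim_ definition above) =====
theorem build_support_handoff_stats_spec : Claim_unchanged_build_support_handoff_stats := by
  intro hs _
  unfold Spec_build_support_handoff_stats
  exact pv_unchanged hs

theorem build_support_handoff_stats_changed : Claim_changed_build_support_handoff_stats := by
  unfold Claim_changed_build_support_handoff_stats; decide

theorem build_support_handoff_stats_tight : Claim_exact_build_support_handoff_stats := by
  intro hs _
  exact pv_exact hs
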